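-- pv_equiv track=rewrite | github.com/liuxiaomingskm/learnGit | friends.py | num_friends
-- ===== SOURCE A (Python) =====
-- users =[
--     { "id":0, "name": "Hero" },
--     { "id":1, "name": "Dunn" },
--     { "id":2, "name": "Sue" },
--     { "id":3, "name": "Chi" },
--     { "id":4, "name": "Thor" },
--     { "id":5, "name": "Clive" },
--     { "id":6, "name": "Hicks" },
--     { "id":7, "name": "Devin" },
--     { "id":8, "name": "Kate" },
--     { "id":9, "name": "Klein" }
-- ]
--
-- friendship = [
--     (0, 1),
--     (0, 2),
--     (1, 2),
--     (1, 3),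
--     (2, 3),
--     (3, 4),
--     (4, 5),
--     (5, 6),
--     (6, 7),
--     (6, 8),
--     (7, 8),
--     (8, 9)
-- ]
--
-- def num_friends(user):
--     num_of_friends=0
--     id_no=None
--     for dic in users:
--         if dic['name']==user:
--             id_no=dic["id"]
--     for tup in friendship:
--         if id_no in tup:
--             num_of_friends+=1
--     return num_of_friends
-- ===== SOURCE B (Python) =====
-- users =[
--     { "id":0, "name": "Hero" },
--     { "id":1, "name": "Dunn" },
--     { "id":2, "name": "Sue" },
--     { "id":3, "name": "Chi" },
--     { "id":4, "name": "Thor" },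
--     { "id":5, "name": "Clive" },
--     { "id":6, "name": "Hicks" },
--     { "id":7, "name": "Devin" },
--     { "id":8, "name": "Kate" },
--     { "id":9, "name": "Klein" }
-- ]
--
-- friendship = [
--     (0, 1),
--     (0, 2),
--     (1, 2),
--     (1, 3),
--     (2, 3),
--     (3, 4),
--     (4, 5),
--     (5, 6),
--     (6, 7),
--     (6, 8),
--     (7, 8),
--     (8, 9)
-- ]
--
-- _name_to_id = {u["name"]: u["id"] for u in users}
--
-- _degree = {}
-- for a, b in friendship:
--     _degree[a] = _degree.get(a, 0) + 1
--     _degree[b] = _degree.get(b, 0) + 1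
--
-- def num_friends(user):
--     return _degree.get(_name_to_id.get(user), 0)
-- ===== Notes on version B (the rewrite author's own statement) =====
-- stated objective: idiomatic
-- what changed: Replaces A's two per-call linear scans (users for the id, friendship for the count) with module-level precomputed name->id and id->degree dicts so each call is two lookups.
import Mathlib
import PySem

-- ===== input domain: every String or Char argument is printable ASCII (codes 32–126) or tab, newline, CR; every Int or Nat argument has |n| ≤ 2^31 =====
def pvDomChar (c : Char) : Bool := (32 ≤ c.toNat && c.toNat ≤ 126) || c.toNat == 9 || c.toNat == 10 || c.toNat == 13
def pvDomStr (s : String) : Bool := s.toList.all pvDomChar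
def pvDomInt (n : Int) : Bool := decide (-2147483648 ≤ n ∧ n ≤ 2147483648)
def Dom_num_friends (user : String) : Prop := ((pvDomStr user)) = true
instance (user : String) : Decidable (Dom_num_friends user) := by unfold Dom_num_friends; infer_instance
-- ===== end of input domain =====

-- B replaces A's two linear scans by precomputed name→id and id→degree tables with one lookup each (idiomatic/alternative; the module-level data is fixed, so no speed claim).

-- ===== PORT A =====
-- the module constants, as (id, name) pairs / (id, id) pairs
def pvUsers : List (Int × String) :=
  [(0, "Hero"), (1, "Dunn"), (2, "Sue"), (3, "Chi"), (4, "Thor"),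
   (5, "Clive"), (6, "Hicks"), (7, "Devin"), (8, "Kate"), (9, "Klein")]

def pvFriendship : List (Int × Int) :=
  [(0, 1), (0, 2), (1, 2), (1, 3), (2, 3), (3, 4),
   (4, 5), (5, 6), (6, 7), (6, 8), (7, 8), (8, 9)]

def num_friends (user : String) : Int :=
  -- first loop: id_no starts None, last matching user wins
  let id_no : Option Int :=
    pvUsers.foldl (fun acc p => if p.2 == user then some p.1 else acc) none
  -- second loop: count tuples with id_no in tup (None is in no tuple)
  pvFriendship.foldl
    (fun n t =>
      if (match id_no with
          | some i => i == t.1 || i == t.2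
          | none => false) then n + 1 else n) 0

-- ===== PORT B =====
-- _name_to_id = {u["name"]: u["id"] for u in users}
def pvNameToId : PySem.Dict String Int :=
  pvUsers.foldl (fun d p => d.insert p.2 p.1) PySem.Dict.empty

-- _degree built once over friendship
def pvDegree : PySem.Dict Int Int :=
  pvFriendship.foldl
    (fun d t =>
      let d := d.insert t.1 (d.getD t.1 0 + 1)
      d.insert t.2 (d.getD t.2 0 + 1)) PySem.Dict.empty

def num_friends_alt (user : String) : Int :=
  match pvNameToId.get? user with
  | some i => pvDegree.getD i 0
  | none => 0

-- ===== PRECONDITION & SPEC =====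
def Spec_num_friends (user : String) (out : Int) : Prop := out = num_friends_alt user
instance (user : String) (out : Int) : Decidable (Spec_num_friends user out) := by unfold Spec_num_friends; infer_instance

-- ===== CLAIM (what is proved, stated in full; the proofs are below) =====
def Claim_equal_num_friends : Prop := ∀ (user : String), Dom_num_friends user → Spec_num_friends user (num_friends user)

-- ===== LEMMAS AND PROOFS =====

-- If user is none of the ten names, both sides return 0.
theorem num_friends_unknown (user : String)
    (h : ∀ p ∈ pvUsers, p.2 ≠ user) :
    num_friends user = 0 ∧ num_friends_alt user = 0 := by
  have h' : ∀ p ∈ pvUsers, (p.2 == user) = false := by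
    intro p hp; simpa using h p hp
  constructor
  · simp only [num_friends, pvUsers] at *
    simp_all
  · have : pvNameToId.get? user = none := by
      simp only [pvNameToId, pvUsers] at *
      simp_all [PySem.Dict.insert, PySem.Dict.empty, PySem.Dict.get?]
    simp [num_friends_alt, this]

-- ===== VERDICT (by name: the statement is the Claim_ definition above) =====
theorem num_friends_spec : Claim_equal_num_friends := by
  intro user _
  unfold Spec_num_friends
  by_cases h0 : user = "Hero"; · subst h0; decide
  by_cases h1 : user = "Dunn"; · subst h1; decide
  by_cases h2 : user = "Sue"; · subst h2; decide
  by_cases h3 : user = "Chi"; · subst h3; decide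
  by_cases h4 : user = "Thor"; · subst h4; decide
  by_cases h5 : user = "Clive"; · subst h5; decide
  by_cases h6 : user = "Hicks"; · subst h6; decide
  by_cases h7 : user = "Devin"; · subst h7; decide
  by_cases h8 : user = "Kate"; · subst h8; decide
  by_cases h9 : user = "Klein"; · subst h9; decide
  have h : ∀ p ∈ pvUsers, p.2 ≠ user := by
    intro p hp
    fin_cases hp <;> simp_all [eq_comm]
  obtain ⟨ha, hb⟩ := num_friends_unknown user h
  rw [ha, hb]
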